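-- pv_equiv track=rewrite | github.com/WillMorrison/SAGP | table_parser.py | FindSeparations
-- ===== SOURCE A (Python) =====
-- def FindSeparations(line):
--   """Finds the separations in a fixed width line.
--
--   Columns are assumed to be right-aligned and space padded, with at least one
--   space between each column and no internal spaces.
--
--   Returns:
--     A sequence of (begin, end) tuples, where begin is the first character index
--     in a column and end is one past the last index so that line[begin:end] is
--     the cell contents.
--   """
--   separations = []
--   cell_begin=0
--   space_previous=True
--   for i in range(len(line)):
--     if line[i].isspace() and not space_previous:
--       separations.append((cell_begin, i))
--       cell_begin = i
--     space_previous = line[i].isspace()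
--   else:
--     if not space_previous:
--       separations.append((cell_begin, len(line)))
--   return separations
-- ===== SOURCE B (Python) =====
-- import itertools
--
--
-- def FindSeparations(line):
--   """Finds the separations in a fixed width line.
--
--   Same contract as the original: each cell spans from the previous cell's end
--   (the first cell from 0) to the end of its non-space run.
--   """
--   separations = []
--   index = 0
--   prev_end = 0
--   for is_space, group in itertools.groupby(line, key=str.isspace):
--     index += sum(1 for _ in group)
--     if not is_space:
--       separations.append((prev_end, index))
--       prev_end = index
--   return separations
-- ===== Notes on version B (the rewrite author's own statement) =====
-- stated objective: idiomatic
-- what changed: Replaces A's per-character state machine (space_previous flag, per-index branch) by itertools.groupby on str.isspace: one fold over whole runs that emits (prev_end, index+len) for each non-space run.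
import Mathlib
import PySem

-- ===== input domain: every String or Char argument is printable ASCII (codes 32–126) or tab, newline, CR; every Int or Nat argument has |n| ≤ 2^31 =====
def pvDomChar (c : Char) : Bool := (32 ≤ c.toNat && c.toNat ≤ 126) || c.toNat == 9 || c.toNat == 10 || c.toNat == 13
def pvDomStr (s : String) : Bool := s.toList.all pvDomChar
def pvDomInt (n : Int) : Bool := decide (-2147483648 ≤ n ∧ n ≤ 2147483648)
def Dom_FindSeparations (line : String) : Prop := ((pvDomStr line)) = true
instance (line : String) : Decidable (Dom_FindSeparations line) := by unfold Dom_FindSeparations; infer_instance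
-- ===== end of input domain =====

-- B replaces A's per-character state machine by grouping consecutive same-key runs
-- (itertools.groupby on str.isspace) and folding over the runs (objective: idiomatic).

-- ===== PORT A =====
-- A's loop state: (separations, cell_begin, space_previous); one step per character i.
def pvAStep (st : List (Int × Int) × Int × Bool) (p : Int × Char) :
    List (Int × Int) × Int × Bool :=
  let (seps, cb, _sp) := st
  let (i, c) := p
  if PySem.Chars.isspace c && !st.2.2 then (seps ++ [(cb, i)], i, PySem.Chars.isspace c)
  else (seps, cb, PySem.Chars.isspace c)

def FindSeparations (line : String) : List (Int × Int) :=
  let l := line.toList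
  let st := (PySem.List.enumerate l 0).foldl pvAStep ([], 0, true)
  if !st.2.2 then st.1 ++ [(st.2.1, (l.length : Int))] else st.1

-- ===== PORT B =====
-- itertools.groupby(line, key=str.isspace): list of (key, run) pairs, built structurally.
def pvGroupBySpace : List Char → List (Bool × List Char)
  | [] => []
  | c :: cs =>
    match pvGroupBySpace cs with
    | [] => [(PySem.Chars.isspace c, [c])]
    | (k, g) :: rest =>
      if PySem.Chars.isspace c == k then (k, c :: g) :: rest
      else (PySem.Chars.isspace c, [c]) :: (k, g) :: rest

-- B's loop over the groups: state (separations, index, prev_end).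
def pvBFold : List (Bool × List Char) → List (Int × Int) → Int → Int → List (Int × Int)
  | [], seps, _idx, _pe => seps
  | (isSpace, g) :: gs, seps, idx, pe =>
    let idx' := idx + (g.length : Int)
    if !isSpace then pvBFold gs (seps ++ [(pe, idx')]) idx' idx'
    else pvBFold gs seps idx' pe

def FindSeparations_alt (line : String) : List (Int × Int) :=
  pvBFold (pvGroupBySpace line.toList) [] 0 0

-- ===== PRECONDITION & SPEC =====
def Spec_FindSeparations (line : String) (out : List (Int × Int)) : Prop := out = FindSeparations_alt line
instance (line : String) (out : List (Int × Int)) : Decidable (Spec_FindSeparations line out) := by unfold Spec_FindSeparations; infer_instance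

-- ===== CLAIM (what is proved, stated in full; the proofs are below) =====
def Claim_equal_FindSeparations : Prop := ∀ (line : String), Dom_FindSeparations line → Spec_FindSeparations line (FindSeparations line)

-- ===== LEMMAS AND PROOFS =====

-- Canonical recursive description of the result, shared by both proofs:
-- state (pos, cell_begin, space_previous).
def pvSpec : List Char → Int → Int → Bool → List (Int × Int)
  | [], pos, cb, sp => if !sp then [(cb, pos)] else []
  | c :: cs, pos, cb, sp =>
    if PySem.Chars.isspace c && !sp then (cb, pos) :: pvSpec cs (pos + 1) pos true
    else pvSpec cs (pos + 1) cb (PySem.Chars.isspace c)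

-- A's fold (plus finalization) computes pvSpec.
theorem pvA_loop (l : List Char) : ∀ (i cb : Int) (sp : Bool) (seps : List (Int × Int)),
    (if !((PySem.List.enumerate l i).foldl pvAStep (seps, cb, sp)).2.2 then
       ((PySem.List.enumerate l i).foldl pvAStep (seps, cb, sp)).1
         ++ [(((PySem.List.enumerate l i).foldl pvAStep (seps, cb, sp)).2.1, i + (l.length : Int))]
     else ((PySem.List.enumerate l i).foldl pvAStep (seps, cb, sp)).1)
      = seps ++ pvSpec l i cb sp := by
  induction l with
  | nil =>
    intro i cb sp seps
    simp only [PySem.List.enumerate_nil, List.foldl_nil, List.length_nil, pvSpec]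
    cases sp <;> simp
  | cons c cs ih =>
    intro i cb sp seps
    have harith : i + (((cs.length + 1 : Nat) : Int)) = (i + 1) + (cs.length : Int) := by
      push_cast; ring
    simp only [PySem.List.enumerate_cons, List.foldl_cons, List.length_cons, harith, pvSpec]
    cases hc : PySem.Chars.isspace c <;> cases sp
    · rw [show pvAStep (seps, cb, false) (i, c) = (seps, cb, false) by simp [pvAStep, hc]]
      simpa [hc] using ih (i + 1) cb false seps
    · rw [show pvAStep (seps, cb, true) (i, c) = (seps, cb, false) by simp [pvAStep, hc]]
      simpa [hc] using ih (i + 1) cb false seps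
    · rw [show pvAStep (seps, cb, false) (i, c) = (seps ++ [(cb, i)], i, true) by
        simp [pvAStep, hc]]
      have := ih (i + 1) i true (seps ++ [(cb, i)])
      simpa [hc, List.append_assoc] using this
    · rw [show pvAStep (seps, cb, true) (i, c) = (seps, cb, true) by simp [pvAStep, hc]]
      simpa [hc] using ih (i + 1) cb true seps

-- pvGroupBySpace peels one maximal run off the front.
theorem pvGroup_cons (c : Char) (cs : List Char) :
    pvGroupBySpace (c :: cs)
      = (PySem.Chars.isspace c,
          c :: cs.takeWhile (fun d => PySem.Chars.isspace d == PySem.Chars.isspace c))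
        :: pvGroupBySpace (cs.dropWhile (fun d => PySem.Chars.isspace d == PySem.Chars.isspace c)) := by
  induction cs generalizing c with
  | nil => simp [pvGroupBySpace]
  | cons d ds ih =>
    rw [show pvGroupBySpace (c :: d :: ds)
        = (match pvGroupBySpace (d :: ds) with
           | [] => [(PySem.Chars.isspace c, [c])]
           | (k, g) :: rest =>
             if PySem.Chars.isspace c == k then (k, c :: g) :: rest
             else (PySem.Chars.isspace c, [c]) :: (k, g) :: rest) from rfl]
    by_cases h : PySem.Chars.isspace d = PySem.Chars.isspace c
    · rw [ih d, h]
      simp [h]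
    · have h' : (PySem.Chars.isspace d == PySem.Chars.isspace c) = false := by simpa using h
      have h'' : (PySem.Chars.isspace c == PySem.Chars.isspace d) = false := by
        simp; exact fun e => h e.symm
      rw [ih d]
      simp only [h'', Bool.false_eq_true, if_false, List.takeWhile_cons, List.dropWhile_cons, h']
      rw [ih d]

-- pvSpec skips a uniform space run when space_previous is already true.
theorem pvSpec_space_run (g : List Char) (hg : ∀ c ∈ g, PySem.Chars.isspace c = true) :
    ∀ (rest : List Char) (pos cb : Int),
    pvSpec (g ++ rest) pos cb true = pvSpec rest (pos + (g.length : Int)) cb true := by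
  induction g with
  | nil => intro rest pos cb; simp
  | cons c cs ih =>
    intro rest pos cb
    have hc := hg c (by simp)
    have ih' := ih (fun d hd => hg d (by simp [hd]))
    simp only [List.cons_append, pvSpec, hc, Bool.not_true, Bool.and_false, Bool.false_eq_true,
      if_false]
    rw [ih' rest (pos + 1) cb]
    congr 1
    simp only [List.length_cons]
    push_cast
    ring

-- pvSpec walks through a uniform non-space run: no emission, cell_begin kept, sp becomes false.
theorem pvSpec_word_run (g : List Char) (hg : ∀ c ∈ g, PySem.Chars.isspace c = false)
    (hne : g ≠ []) :
    ∀ (rest : List Char) (pos cb : Int) (sp : Bool),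
    pvSpec (g ++ rest) pos cb sp = pvSpec rest (pos + (g.length : Int)) cb false := by
  induction g with
  | nil => intro rest pos cb sp; exact absurd rfl hne
  | cons c cs ih =>
    intro rest pos cb sp
    have hc := hg c (by simp)
    simp only [List.cons_append, pvSpec, hc, Bool.false_and, Bool.false_eq_true, if_false]
    rcases Decidable.em (cs = []) with h | h
    · subst h; simp
    · rw [ih (fun d hd => hg d (by simp [hd])) h rest (pos + 1) cb false]
      congr 1
      simp only [List.length_cons]
      push_cast
      ring

-- Resuming after a word run with sp = false: emit the pending cell first.
theorem pvSpec_after_word (rest : List Char)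
    (h : rest = [] ∨ ∃ d ds, rest = d :: ds ∧ PySem.Chars.isspace d = true)
    (pos cb : Int) :
    pvSpec rest pos cb false = (cb, pos) :: pvSpec rest pos pos true := by
  rcases h with h | ⟨d, ds, rfl, hd⟩
  · subst h; simp [pvSpec]
  · simp [pvSpec, hd]

-- the first element surviving dropWhile fails the predicate.
theorem pvDropWhile_head_false {q : Char → Bool} : ∀ (l : List Char) (d : Char) (ds : List Char),
    l.dropWhile q = d :: ds → q d = false := by
  intro l
  induction l with
  | nil => intro d ds h; simp at h
  | cons e es ih =>
    intro d ds h
    rw [List.dropWhile_cons] at h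
    by_cases he : q e = true
    · exact ih d ds (by simpa [he] using h)
    · have : e = d := by simp [he] at h; exact h.1
      subst this
      simpa using he

-- one step of B's fold, as an equation.
theorem pvBFold_cons (k : Bool) (g : List Char) (gs : List (Bool × List Char))
    (seps : List (Int × Int)) (idx pe : Int) :
    pvBFold ((k, g) :: gs) seps idx pe
      = if !k then pvBFold gs (seps ++ [(pe, idx + (g.length : Int))]) (idx + (g.length : Int))
                (idx + (g.length : Int))
        else pvBFold gs seps (idx + (g.length : Int)) pe := rfl

-- B's fold over the groups of l computes pvSpec l with space_previous = true
-- (strong induction on the length: each step consumes one whole run).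
theorem pvB_loop_aux (n : Nat) : ∀ (l : List Char), l.length ≤ n →
    ∀ (seps : List (Int × Int)) (idx pe : Int),
    pvBFold (pvGroupBySpace l) seps idx pe = seps ++ pvSpec l idx pe true := by
  induction n with
  | zero =>
    intro l hl seps idx pe
    have : l = [] := List.eq_nil_of_length_eq_zero (Nat.le_zero.mp hl)
    subst this
    simp [pvGroupBySpace, pvBFold, pvSpec]
  | succ n ih =>
    intro l hl seps idx pe
    match l with
    | [] => simp [pvGroupBySpace, pvBFold, pvSpec]
    | c :: cs =>
      set p := fun d => PySem.Chars.isspace d == PySem.Chars.isspace c with hpdef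
      have hlen : (cs.dropWhile p).length ≤ n :=
        le_trans (List.length_dropWhile_le _ _) (Nat.le_of_succ_le_succ hl)
      have hrun : ∀ d ∈ c :: cs.takeWhile p, PySem.Chars.isspace d = PySem.Chars.isspace c := by
        intro d hd
        rcases List.mem_cons.mp hd with rfl | hd'
        · rfl
        · simpa [hpdef] using List.mem_takeWhile_imp hd'
      have hsplit : (c :: cs : List Char) = (c :: cs.takeWhile p) ++ cs.dropWhile p := by
        simp [List.takeWhile_append_dropWhile]
      have hrest : cs.dropWhile p = [] ∨
          ∃ d ds, cs.dropWhile p = d :: ds ∧ PySem.Chars.isspace d = !PySem.Chars.isspace c := by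
        cases hdw : cs.dropWhile p with
        | nil => exact Or.inl rfl
        | cons d ds =>
          refine Or.inr ⟨d, ds, rfl, ?_⟩
          have hh : p d = false := pvDropWhile_head_false cs d ds hdw
          rw [hpdef] at hh
          cases h1 : PySem.Chars.isspace d <;> cases h2 : PySem.Chars.isspace c <;>
            simp [h1, h2] at hh ⊢
      rw [pvGroup_cons, pvBFold_cons]
      rcases Bool.dichotomy (PySem.Chars.isspace c) with hk | hk
      · -- word run
        rw [if_pos (by rw [hk]; rfl)]
        rw [ih (cs.dropWhile p) hlen
          (seps ++ [(pe, idx + (((c :: cs.takeWhile p).length : Nat) : Int))])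
          (idx + (((c :: cs.takeWhile p).length : Nat) : Int))
          (idx + (((c :: cs.takeWhile p).length : Nat) : Int))]
        have hw : ∀ d ∈ (c :: cs.takeWhile p), PySem.Chars.isspace d = false := by
          intro d hd; rw [hrun d hd, hk]
        conv_rhs => rw [hsplit]
        rw [pvSpec_word_run _ hw (by simp) (cs.dropWhile p) idx pe true]
        rw [pvSpec_after_word (cs.dropWhile p)
          (by
            rcases hrest with h | ⟨d, ds, hdw, hd⟩
            · exact Or.inl h
            · exact Or.inr ⟨d, ds, hdw, by rw [hd, hk]; rfl⟩)
          (idx + (((c :: cs.takeWhile p).length : Nat) : Int)) pe]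
        simp [List.append_assoc]
      · -- space run
        rw [if_neg (by rw [hk]; simp)]
        rw [ih (cs.dropWhile p) hlen seps (idx + (((c :: cs.takeWhile p).length : Nat) : Int)) pe]
        have hsp : ∀ d ∈ (c :: cs.takeWhile p), PySem.Chars.isspace d = true := by
          intro d hd; rw [hrun d hd, hk]
        conv_rhs => rw [hsplit]
        rw [pvSpec_space_run _ hsp (cs.dropWhile p) idx pe]

theorem pvB_loop (l : List Char) (seps : List (Int × Int)) (idx pe : Int) :
    pvBFold (pvGroupBySpace l) seps idx pe = seps ++ pvSpec l idx pe true :=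
  pvB_loop_aux l.length l le_rfl seps idx pe

-- ===== VERDICT (by name: the statement is the Claim_ definition above) =====
theorem FindSeparations_spec : Claim_equal_FindSeparations := by
  intro line _
  show FindSeparations line = FindSeparations_alt line
  unfold FindSeparations FindSeparations_alt
  rw [pvB_loop line.toList [] 0 0]
  simpa using pvA_loop line.toList 0 0 true []
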